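-- pv_equiv track=rewrite | github.com/yovanycunha/P1 | frequencia/frequencia.py | get_frequencia
-- ===== SOURCE A (Python) =====
-- def get_frequencia(sequencia):
-- 	repetidos = []
-- 	while len(sequencia) != 0:
-- 		repetido = 0
-- 		elemento = sequencia[0]
-- 		for i in range(len(sequencia)-1,-1,-1):
-- 			if sequencia[i] == elemento:
-- 				sequencia.pop(i)
-- 				repetido += 1
-- 		repetidos.append(repetido)
-- 	return repetidos
-- ===== SOURCE B (Python) =====
-- def get_frequencia(sequencia):
--     counts = {}
--     while sequencia:
--         e = sequencia.pop(0)
--         counts[e] = counts.get(e, 0) + 1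
--     return list(counts.values())
-- ===== Notes on version B (the rewrite author's own statement) =====
-- stated objective: faster
-- what changed: Replaces A's repeated inner scan-and-remove pass per distinct element with a single draining pass that accumulates counts in a dict keyed by element, returning the dict's values in first-appearance order.
import Mathlib
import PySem

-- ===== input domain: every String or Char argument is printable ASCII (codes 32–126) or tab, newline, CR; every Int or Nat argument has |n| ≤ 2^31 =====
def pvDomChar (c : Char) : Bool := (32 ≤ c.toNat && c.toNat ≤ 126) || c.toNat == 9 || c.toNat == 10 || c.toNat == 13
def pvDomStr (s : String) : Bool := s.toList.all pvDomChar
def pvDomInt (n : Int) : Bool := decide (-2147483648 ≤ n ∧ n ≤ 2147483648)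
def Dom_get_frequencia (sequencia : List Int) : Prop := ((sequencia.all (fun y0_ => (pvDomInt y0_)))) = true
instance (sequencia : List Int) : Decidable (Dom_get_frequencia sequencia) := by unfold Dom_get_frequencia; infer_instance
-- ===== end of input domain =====

-- B replaces A's quadratic scan-and-remove per distinct element with one dict-counting pass
-- (objective: faster); in Python both A and B leave `sequencia` empty, and the equivalence
-- proved here is about the return value.


-- ===== PORT A =====
-- inner `for i in range(len(sequencia)-1, -1, -1)` loop of A, as a downward structural
-- recursion on the index: `i+1` means index `i` is processed next. While the loop runs,
-- every visited index is in range (proved in innerA_spec), so `List.getD i 0` is exactly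
-- Python's `sequencia[i]` and `List.eraseIdx i` is exactly Python's `sequencia.pop(i)`.
def innerA (elemento : Int) : Nat → List Int × Int → List Int × Int
  | 0, st => st
  | i + 1, st =>
      innerA elemento i (if st.1.getD i 0 == elemento then (st.1.eraseIdx i, st.2 + 1) else st)

-- what one full inner pass does to the prefix it visits (needed for A's termination)
theorem innerA_spec (e : Int) : ∀ (i : Nat) (s : List Int) (rep : Int), i ≤ s.length →
    innerA e i (s, rep) =
      ((s.take i).filter (fun x => !(x == e)) ++ s.drop i, rep + ((s.take i).count e : Int)) := by
  intro i
  induction i with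
  | zero => intro s rep _; simp [innerA]
  | succ i ih =>
      intro s rep hle
      have hi : i < s.length := by omega
      have hgd : s.getD i 0 = s[i] := by
        simp [List.getD_eq_getElem?_getD, List.getElem?_eq_getElem hi]
      by_cases hbe : (s[i] == e) = true
      · have hlen' : i ≤ (s.eraseIdx i).length := by
          rw [List.length_eraseIdx_of_lt hi]; omega
        simp only [innerA, hgd, hbe, if_pos]
        rw [ih (s.eraseIdx i) (rep + 1) hlen']
        rw [List.eraseIdx_eq_take_drop_succ]
        have htl : (s.take i).length = i := by simp [hi.le]
        rw [List.take_left' htl, List.drop_left' htl]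
        rw [List.take_add_one, List.getElem?_eq_getElem hi]
        simp only [Option.toList_some, List.filter_append, List.count_append]
        have he : s[i] = e := by simpa using hbe
        rw [Prod.mk.injEq]
        constructor
        · simp [he]
        · simp [he]; ring
      · simp only [innerA, hgd, hbe, if_neg, Bool.false_eq_true, not_false_iff]
        rw [ih s rep (by omega)]
        rw [List.take_add_one, List.getElem?_eq_getElem hi]
        simp only [Option.toList_some, List.filter_append, List.count_append]
        rw [Prod.mk.injEq]
        constructor
        · rw [List.drop_eq_getElem_cons hi]
          simp [hbe]
        · have hfe : (s[i] == e) = false := by simpa using hbe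
          simp [List.count_singleton, hfe]

theorem innerA_full (s : List Int) (e : Int) :
    innerA e s.length (s, 0) = (s.filter (fun x => !(x == e)), (s.count e : Int)) := by
  simpa using innerA_spec e s.length s 0 le_rfl

-- length strictly drops across one outer iteration (cited by get_frequencia's decreasing_by)
theorem innerA_len (h : Int) (t : List Int) :
    (innerA h (t.length + 1) (h :: t, 0)).1.length < t.length + 1 := by
  have hfull := innerA_full (h :: t) h
  simp only [List.length_cons] at hfull
  rw [hfull]
  have hlf := List.length_filter_le (fun x => !(x == h)) t
  simp
  omega

-- A: while the list is nonempty, scan it back-to-front removing every copy of the head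
-- while counting, and append the count.
def get_frequencia (sequencia : List Int) : List Int :=
  match sequencia with
  | [] => []
  | h :: t =>
      (innerA h (t.length + 1) (h :: t, 0)).2 ::
        get_frequencia (innerA h (t.length + 1) (h :: t, 0)).1
termination_by sequencia.length
decreasing_by simpa using innerA_len h t

-- ===== PORT B =====
-- B: drain the list from the front (`sequencia.pop(0)`), bumping a dict counter
def altLoop : List Int → PySem.Dict Int Int → PySem.Dict Int Int
  | [], counts => counts
  | e :: rest, counts => altLoop rest (counts.insert e (counts.getD e 0 + 1))

def get_frequencia_alt (sequencia : List Int) : List Int :=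
  (altLoop sequencia PySem.Dict.empty).values

-- ===== PRECONDITION & SPEC =====
def Spec_get_frequencia (sequencia : List Int) (out : List Int) : Prop := out = get_frequencia_alt sequencia
instance (sequencia : List Int) (out : List Int) : Decidable (Spec_get_frequencia sequencia out) := by unfold Spec_get_frequencia; infer_instance

-- ===== CLAIM (what is proved, stated in full; the proofs are below) =====
def Claim_equal_get_frequencia : Prop := ∀ (sequencia : List Int), Dom_get_frequencia sequencia → Spec_get_frequencia sequencia (get_frequencia sequencia)

-- ===== LEMMAS AND PROOFS =====
theorem altLoop_eq_foldl : ∀ (s : List Int) (d : PySem.Dict Int Int),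
    altLoop s d = s.foldl (fun d x => d.insert x (d.getD x 0 + 1)) d := by
  intro s
  induction s with
  | nil => intro d; simp [altLoop]
  | cons e rest ih => intro d; simp [altLoop, List.foldl, ih]

theorem alt_eq (s : List Int) :
    get_frequencia_alt s = (PySem.Set.ofList s).map (fun k => ((s.count k : Nat) : Int)) := by
  unfold get_frequencia_alt
  rw [altLoop_eq_foldl, PySem.Dict.foldl_insert_getD_add_one_eq_counter]
  simp [PySem.Dict.values, PySem.Dict.items_counter, List.map_map, Function.comp]

theorem ofList_filter (p : Int → Bool) : ∀ (t : List Int),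
    PySem.Set.ofList (t.filter p) = (PySem.Set.ofList t).filter p := by
  intro t
  induction t with
  | nil => simp [PySem.Set.ofList]
  | cons x t ih =>
      by_cases hp : p x = true
      · simp only [List.filter_cons, hp, if_pos]
        rw [PySem.Set.ofList_cons, PySem.Set.ofList_cons]
        simp only [PySem.Set.discard, List.filter_cons, hp, if_pos, ih, List.filter_filter]
        congr 1
        exact List.filter_congr (fun a _ => by rw [Bool.and_comm])
      · simp only [List.filter_cons, hp, Bool.false_eq_true, if_neg, not_false_iff]
        rw [PySem.Set.ofList_cons]
        simp only [PySem.Set.discard, List.filter_cons, hp, List.filter_filter, ih]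
        apply List.filter_congr
        intro a _
        by_cases hax : a = x
        · subst hax; simp [hp]
        · simp [hax]

theorem freq_main : ∀ (n : Nat) (s : List Int), s.length ≤ n →
    get_frequencia s = (PySem.Set.ofList s).map (fun k => ((s.count k : Nat) : Int)) := by
  intro n
  induction n with
  | zero =>
      intro s hle
      have : s = [] := List.length_eq_zero_iff.mp (by omega)
      subst this
      simp [get_frequencia, PySem.Set.ofList]
  | succ n ih =>
      intro s hle
      match s with
      | [] => simp [get_frequencia, PySem.Set.ofList]
      | h :: t =>
          have hfull := innerA_full (h :: t) h
          simp only [List.length_cons] at hfull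
          have hqh : ((h :: t).filter (fun x => !(x == h))) = t.filter (fun x => !(x == h)) := by
            simp
          rw [get_frequencia, hfull, hqh]
          have hlen : (t.filter (fun x => !(x == h))).length ≤ n := by
            have := List.length_filter_le (fun x => !(x == h)) t
            simp only [List.length_cons] at hle
            omega
          rw [ih _ hlen]
          rw [PySem.Set.ofList_cons]
          simp only [PySem.Set.discard]
          rw [← ofList_filter (fun x => !(x == h)) t]
          simp only [List.map_cons]
          congr 1
          apply List.map_congr_left
          intro k hk
          have hkmem : k ∈ t.filter (fun x => !(x == h)) := (PySem.Set.mem_ofList _ _).mp hk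
          have hkq : (!(k == h)) = true := (List.mem_filter.mp hkmem).2
          have hkh : ¬ (k == h) = true := by simpa using hkq
          have hne : h ≠ k := by
            intro hhk
            apply hkh
            simp [hhk]
          have h1 : (h :: t).count k = t.count k := by
            simp [hne]
          have h2 : (t.filter (fun x => !(x == h))).count k = t.count k :=
            List.count_filter hkq
          rw [h1, h2]

-- ===== VERDICT (by name: the statement is the Claim_ definition above) =====
theorem get_frequencia_spec : Claim_equal_get_frequencia := by
  intro s _
  unfold Spec_get_frequencia
  rw [freq_main s.length s le_rfl, alt_eq]
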